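-- pv_equiv track=rewrite | github.com/captainfffsama/auto_read_meter | core/inference.py | get_dict_diff
-- ===== SOURCE A (Python) =====
-- def get_dict_diff(diff_dict: dict):
--     diff_count_list = [(k, len(v)) for k, v in diff_dict.items()]
--     diff_count_list.sort(key=lambda x: x[-1], reverse=True)
--     try:
--         candicate_k = [
--             diff_count_list[0][0],
--         ]
--     except Exception as e:
--         raise e
--         # breakpoint()
--     for i in range(1, len(diff_count_list)):
--         if diff_count_list[i][-1] == diff_count_list[0][-1]:
--             candicate_k.append(diff_count_list[i][0])
--         else:
--             break
--     candicate_k_t = [x for x in candicate_k if x > 0]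
--     if not candicate_k_t:
--         # breakpoint()
--         raise ValueError("candicate should not be empty")
--     diff_k = min(candicate_k_t)
--     return diff_k, diff_dict[diff_k]
-- ===== SOURCE B (Python) =====
-- def get_dict_diff(diff_dict: dict):
--     # One pass: track the max count and the smallest positive key having it.
--     max_count = -1
--     best = None
--     for k, v in diff_dict.items():
--         c = len(v)
--         if c > max_count:
--             max_count = c
--             best = k if k > 0 else None
--         elif c == max_count and k > 0 and (best is None or k < best):
--             best = k
--     if best is None:
--         raise ValueError("candicate should not be empty")
--     return best, diff_dict[best]
-- ===== Notes on version B (the rewrite author's own statement) =====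
-- stated objective: faster
-- what changed: Replaces A's sort-by-count-descending plus tie-prefix scan with a single fold that tracks the running max count and the smallest positive key attaining it.
import Mathlib
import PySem

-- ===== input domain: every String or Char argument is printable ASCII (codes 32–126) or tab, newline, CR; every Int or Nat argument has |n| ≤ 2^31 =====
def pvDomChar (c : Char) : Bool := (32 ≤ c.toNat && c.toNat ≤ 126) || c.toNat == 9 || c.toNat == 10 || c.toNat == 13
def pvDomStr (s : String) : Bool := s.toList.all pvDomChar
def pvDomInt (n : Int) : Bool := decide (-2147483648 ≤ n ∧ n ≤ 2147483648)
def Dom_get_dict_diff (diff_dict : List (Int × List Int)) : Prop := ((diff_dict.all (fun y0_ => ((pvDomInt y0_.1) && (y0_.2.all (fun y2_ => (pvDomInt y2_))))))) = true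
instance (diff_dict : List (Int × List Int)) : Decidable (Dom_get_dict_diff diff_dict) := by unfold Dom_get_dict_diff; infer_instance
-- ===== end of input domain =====

-- B replaces A's sort-by-count-descending + tie-prefix scan with a single fold tracking
-- the running max count and the smallest positive key attaining it (measured faster at large sizes).

-- ===== PORT A =====
-- diff_dict[k]: first-match lookup in the association list (Python dict lookup).
def dictGet (d : List (Int × List Int)) (k : Int) : List Int :=
  match d.find? (fun p => p.1 == k) with
  | some p => p.2
  | none => []   -- KeyError; unreachable here: the looked-up key always comes from d

def get_dict_diff (diff_dict : List (Int × List Int)) : Int × List Int :=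
  let diff_count_list := diff_dict.map (fun kv => (kv.1, (kv.2.length : Int)))
  match PySem.List.sorted diff_count_list (fun x => x.2) true with
  | [] => (0, [])   -- Python raises IndexError here (empty dict); outside Pre_
  | h :: t =>
    -- the for/break loop collects the prefix of equal counts
    let candicate_k := h.1 :: (t.takeWhile (fun x => x.2 == h.2)).map (·.1)
    let candicate_k_t := candicate_k.filter (fun x => decide (0 < x))
    match PySem.List.min? candicate_k_t (fun x => x) with
    | none => (0, [])   -- Python raises ValueError here; outside Pre_
    | some diff_k => (diff_k, dictGet diff_dict diff_k)

-- ===== PORT B =====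
def altStep (s : Int × Option Int) (kv : Int × List Int) : Int × Option Int :=
  let c : Int := kv.2.length
  if s.1 < c then (c, if 0 < kv.1 then some kv.1 else none)
  else if c = s.1 then
    (s.1, match s.2 with
          | none => if 0 < kv.1 then some kv.1 else none
          | some b => if 0 < kv.1 ∧ kv.1 < b then some kv.1 else some b)
  else s

def get_dict_diff_alt (diff_dict : List (Int × List Int)) : Int × List Int :=
  let st := diff_dict.foldl altStep ((-1 : Int), (none : Option Int))
  match st.2 with
  | none => (0, [])   -- Python raises ValueError here; outside Pre_
  | some k => (k, dictGet diff_dict k)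

-- ===== PRECONDITION & SPEC =====
-- Pre_ excludes exactly the inputs on which A raises: the empty dict (IndexError) and
-- dicts with no positive key among the keys of maximal count (ValueError).
def Pre_get_dict_diff (diff_dict : List (Int × List Int)) : Prop :=
  ∃ p ∈ diff_dict, 0 < p.1 ∧ ∀ q ∈ diff_dict, q.2.length ≤ p.2.length
instance (diff_dict : List (Int × List Int)) : Decidable (Pre_get_dict_diff diff_dict) := by
  unfold Pre_get_dict_diff; infer_instance

def pvWitness_get_dict_diff : (List (Int × List Int)) := [(1, [0])]

def Spec_get_dict_diff (diff_dict : List (Int × List Int)) (out : Int × List Int) : Prop := out = get_dict_diff_alt diff_dict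
instance (diff_dict : List (Int × List Int)) (out : Int × List Int) : Decidable (Spec_get_dict_diff diff_dict out) := by unfold Spec_get_dict_diff; infer_instance

-- ===== CLAIM (what is proved, stated in full; the proofs are below) =====
def Claim_equal_get_dict_diff : Prop := ∀ (diff_dict : List (Int × List Int)), Dom_get_dict_diff diff_dict → Pre_get_dict_diff diff_dict → Spec_get_dict_diff diff_dict (get_dict_diff diff_dict)

-- ===== LEMMAS AND PROOFS =====

-- max of the counts, initialised at -1 exactly as B's loop does
def maxC (d : List (Int × List Int)) : Int :=
  d.foldl (fun m p => max m (p.2.length : Int)) (-1)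

-- positive keys whose count is m
def keysAt (d : List (Int × List Int)) (m : Int) : List Int :=
  (d.filter (fun p => decide (0 < p.1) && decide ((p.2.length : Int) = m))).map (·.1)

-- value-level minimum (Python min of a nonempty list of ints)
def optMin (l : List Int) : Option Int :=
  match l with
  | [] => none
  | x :: t => some (t.foldl min x)

lemma foldl_max_init (l : List (Int × List Int)) (a : Int) :
    a ≤ l.foldl (fun m p => max m (p.2.length : Int)) a := by
  induction l generalizing a with
  | nil => simp
  | cons x xs ih => exact le_trans (le_max_left a _) (ih (max a (x.2.length : Int)))

lemma foldl_max_mem (l : List (Int × List Int)) (a : Int) (p : Int × List Int) (hp : p ∈ l) :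
    (p.2.length : Int) ≤ l.foldl (fun m q => max m (q.2.length : Int)) a := by
  induction l generalizing a with
  | nil => simp at hp
  | cons x xs ih =>
    rcases List.mem_cons.mp hp with h1 | h2
    · subst h1
      exact le_trans (le_max_right a _) (foldl_max_init xs _)
    · exact ih _ h2

lemma foldl_max_le (l : List (Int × List Int)) (a c : Int) (ha : a ≤ c)
    (hl : ∀ p ∈ l, (p.2.length : Int) ≤ c) :
    l.foldl (fun m p => max m (p.2.length : Int)) a ≤ c := by
  induction l generalizing a with
  | nil => simpa using ha
  | cons x xs ih =>
    exact ih _ (max_le ha (hl x List.mem_cons_self)) (fun p hp => hl p (List.mem_cons_of_mem _ hp))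

lemma mem_le_maxC (d : List (Int × List Int)) : ∀ p ∈ d, (p.2.length : Int) ≤ maxC d :=
  fun p hp => foldl_max_mem d (-1) p hp

lemma maxC_append_singleton (d : List (Int × List Int)) (x : Int × List Int) :
    maxC (d ++ [x]) = max (maxC d) (x.2.length : Int) := by
  simp [maxC, List.foldl_append]

lemma keysAt_append_singleton (d : List (Int × List Int)) (x : Int × List Int) (m : Int) :
    keysAt (d ++ [x]) m =
      keysAt d m ++ (if 0 < x.1 ∧ (x.2.length : Int) = m then [x.1] else []) := by
  simp only [keysAt, List.filter_append, List.map_append]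
  congr 1
  by_cases h1 : 0 < x.1 <;> by_cases h2 : (x.2.length : Int) = m <;>
    simp [List.filter, h1, h2]

lemma keysAt_eq_nil_of_gt (d : List (Int × List Int)) (m : Int)
    (h : ∀ p ∈ d, (p.2.length : Int) < m) : keysAt d m = [] := by
  simp only [keysAt, List.map_eq_nil_iff, List.filter_eq_nil_iff]
  intro p hp
  have := h p hp
  simp [Bool.and_eq_true]
  intro _
  omega

lemma optMin_append_singleton (l : List Int) (k : Int) :
    optMin (l ++ [k]) = some (match optMin l with | none => k | some b => min b k) := by
  cases l with
  | nil => simp [optMin]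
  | cons x t => simp [optMin, List.foldl_append]

-- B's fold computes (max count, min positive key at that count)
lemma altFold (d : List (Int × List Int)) :
    d.foldl altStep ((-1 : Int), (none : Option Int)) = (maxC d, optMin (keysAt d (maxC d))) := by
  induction d using List.reverseRecOn with
  | nil => rfl
  | append_singleton d x ih =>
    rw [List.foldl_append, List.foldl_cons, List.foldl_nil, ih]
    have hmax := maxC_append_singleton d x
    by_cases h1 : maxC d < (x.2.length : Int)
    · -- new strict maximum
      have hm' : maxC (d ++ [x]) = (x.2.length : Int) := by rw [hmax]; omega
      have hnil : keysAt d (x.2.length : Int) = [] :=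
        keysAt_eq_nil_of_gt d _ (fun p hp => lt_of_le_of_lt (mem_le_maxC d p hp) h1)
      rw [hm', keysAt_append_singleton d x _, hnil, List.nil_append]
      simp only [altStep]
      rw [if_pos h1]
      by_cases hpos : 0 < x.1
      · simp [hpos, optMin]
      · simp [hpos, optMin]
    · by_cases h2 : (x.2.length : Int) = maxC d
      · -- equal count: the candidate set may grow by x.1
        have hm' : maxC (d ++ [x]) = maxC d := by rw [hmax]; omega
        rw [hm', keysAt_append_singleton d x (maxC d)]
        simp only [altStep]
        rw [if_neg h1, if_pos h2]
        have hif : (if 0 < x.1 ∧ (x.2.length : Int) = maxC d then [x.1] else [])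
            = if 0 < x.1 then [x.1] else [] := by
          by_cases hpos : 0 < x.1 <;> simp [hpos, h2]
        rw [hif]
        by_cases hpos : 0 < x.1
        · simp only [hpos, if_true, true_and]
          rw [optMin_append_singleton]
          cases ho : optMin (keysAt d (maxC d)) with
          | none => rfl
          | some b =>
            dsimp only
            rcases lt_or_ge x.1 b with hlt | hge
            · rw [if_pos hlt]; congr 2; exact (min_eq_right hlt.le).symm
            · rw [if_neg (by omega)]; congr 2; exact (min_eq_left hge).symm
        · simp only [hpos, if_false, false_and]
          rw [List.append_nil]
          cases ho : optMin (keysAt d (maxC d)) <;> rfl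
      · -- smaller count: nothing changes
        have hm' : maxC (d ++ [x]) = maxC d := by rw [hmax]; omega
        rw [hm', keysAt_append_singleton d x (maxC d),
            if_neg (by rintro ⟨_, h⟩; exact h2 h), List.append_nil]
        simp only [altStep]
        rw [if_neg h1, if_neg h2]

lemma min?_id_eq_optMin (l : List Int) :
    PySem.List.min? l (fun x => x) = optMin l := by
  cases l with
  | nil => simp [PySem.List.min?_eq_none_iff, optMin]
  | cons x t => simp [PySem.List.min?_id_cons, optMin]

lemma optMin_eq_some_iff (l : List Int) (m : Int) :
    optMin l = some m ↔ m ∈ l ∧ ∀ y ∈ l, m ≤ y := by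
  rw [← min?_id_eq_optMin]
  constructor
  · intro h
    exact ⟨PySem.List.min?_mem h, fun y hy => PySem.List.min?_isMin h y hy⟩
  · rintro ⟨hm, hle⟩
    cases hm' : PySem.List.min? l (fun x => x) with
    | none =>
      rw [PySem.List.min?_eq_none_iff] at hm'
      subst hm'; simp at hm
    | some m' =>
      have h1 : m ≤ m' := hle m' (PySem.List.min?_mem hm')
      have h2 : m' ≤ m := PySem.List.min?_isMin hm' m hm
      rw [le_antisymm h2 h1]

lemma optMin_perm {l l' : List Int} (h : l.Perm l') : optMin l = optMin l' := by
  cases hl : optMin l with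
  | none =>
    cases l with
    | nil => cases l' with
      | nil => rfl
      | cons y t => exact absurd h (by simp)
    | cons x t => simp [optMin] at hl
  | some m =>
    rw [optMin_eq_some_iff] at hl
    exact (optMin_eq_some_iff l' m).mpr
      ⟨h.mem_iff.mp hl.1, fun y hy => hl.2 y (h.mem_iff.mpr hy)⟩ |>.symm

lemma takeWhile_eq_filter_of_pairwise (t : List (Int × Int)) (c : Int)
    (hp : t.Pairwise (fun a b => b.2 ≤ a.2)) (hle : ∀ y ∈ t, y.2 ≤ c) :
    t.takeWhile (fun x => x.2 == c) = t.filter (fun x => x.2 == c) := by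
  induction t with
  | nil => rfl
  | cons x xs ih =>
    rcases List.pairwise_cons.mp hp with ⟨hx, hxs⟩
    by_cases hc : x.2 = c
    · have hrec := ih hxs (fun y hy => hle y (List.mem_cons_of_mem _ hy))
      simp [hc, hrec]
    · have hxc : x.2 < c := lt_of_le_of_ne (hle x List.mem_cons_self) hc
      have hbeq : (x.2 == c) = false := by simp [hc]
      simp only [List.takeWhile_cons, List.filter_cons, hbeq]
      simp only [Bool.false_eq_true, if_false]
      symm
      rw [List.filter_eq_nil_iff]
      intro y hy
      have : y.2 < c := lt_of_le_of_lt (hx y hy) hxc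
      simp
      omega

lemma maxC_eq_of_max_mem (d : List (Int × List Int)) (c : Int)
    (hmem : ∃ p ∈ d, (p.2.length : Int) = c)
    (hle : ∀ q ∈ d, (q.2.length : Int) ≤ c) : maxC d = c := by
  rcases hmem with ⟨p, hp, hpc⟩
  refine le_antisymm ?_ ?_
  · exact foldl_max_le d (-1) c (by
      have := hle p hp
      omega) hle
  · rw [← hpc]; exact mem_le_maxC d p hp

lemma ports_agree (d : List (Int × List Int)) (hne : d ≠ []) :
    get_dict_diff d = get_dict_diff_alt d := by
  unfold get_dict_diff get_dict_diff_alt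
  rw [altFold]
  dsimp only
  set L := d.map (fun kv => (kv.1, (kv.2.length : Int))) with hL
  cases hs : PySem.List.sorted L (fun x => x.2) true with
  | nil =>
    have : L = [] := (PySem.List.sorted_eq_nil_iff L (fun x => x.2) true).mp hs
    rw [hL] at this
    exact absurd (List.map_eq_nil_iff.mp this) hne
  | cons h t =>
    dsimp only
    have hperm : (h :: t).Perm L := by rw [← hs]; exact PySem.List.sorted_perm L (fun x => x.2) true
    have hmemL : h ∈ L := hperm.mem_iff.mp List.mem_cons_self
    have hge : ∀ y ∈ L, y.2 ≤ h.2 := PySem.List.key_head_sorted_rev_ge L (fun x => x.2) hs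
    obtain ⟨p, hp, hph⟩ : ∃ p ∈ d, (p.1, (p.2.length : Int)) = h := by
      simpa [hL] using hmemL
    have hmaxc : maxC d = h.2 := by
      refine maxC_eq_of_max_mem d h.2 ⟨p, hp, ?_⟩ (fun q hq => ?_)
      · rw [← hph]
      · exact hge (q.1, (q.2.length : Int)) (by rw [hL]; exact List.mem_map_of_mem hq)
    have hpw : (h :: t).Pairwise (fun a b => b.2 ≤ a.2) := by
      have hpw0 := PySem.List.sorted_pairwise_rev L (fun x => x.2)
      rw [hs] at hpw0
      exact hpw0
    have htw : t.takeWhile (fun x => x.2 == h.2) = t.filter (fun x => x.2 == h.2) :=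
      takeWhile_eq_filter_of_pairwise t h.2 (List.pairwise_cons.mp hpw).2
        (fun y hy => (List.pairwise_cons.mp hpw).1 y hy)
    -- A's candidate list of positive keys, as a filter of the sorted list
    have hck : (h.1 :: (t.takeWhile (fun x => x.2 == h.2)).map (·.1)).filter
          (fun x => decide (0 < x))
        = (((h :: t).filter (fun x => (x.2 == h.2) && decide (0 < x.1))).map (·.1)) := by
      rw [htw]
      have h1 : h.1 :: (t.filter (fun x => x.2 == h.2)).map (·.1)
          = ((h :: t).filter (fun x => x.2 == h.2)).map (·.1) := by
        simp
      rw [h1, List.filter_map, List.filter_filter]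
      refine congrArg _ (List.filter_congr fun x _ => ?_)
      simp only [Function.comp]
      rw [Bool.and_comm]
    -- keysAt d (maxC d), as a filter of L
    have hkeys : keysAt d (maxC d)
        = ((L.filter (fun x => (x.2 == h.2) && decide (0 < x.1))).map (·.1)) := by
      have hfun : ∀ q ∈ d, (fun p => decide (0 < p.1) && decide ((p.2.length : Int) = maxC d)) q
          = ((fun x => (x.2 == h.2) && decide (0 < x.1)) ∘
             (fun kv => (kv.1, (kv.2.length : Int)))) q := by
        intro q _
        by_cases h1 : 0 < q.1 <;> by_cases h2 : (q.2.length : Int) = h.2 <;>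
          simp [Function.comp, hmaxc, h1, h2]
      rw [hL, List.filter_map, List.map_map, keysAt, List.filter_congr hfun]
      rfl
    have hperm2 : ((h :: t).filter (fun x => (x.2 == h.2) && decide (0 < x.1))).map (·.1)
        |>.Perm (keysAt d (maxC d)) := by
      rw [hkeys]
      exact (hperm.filter _).map _
    rw [min?_id_eq_optMin, hck, optMin_perm hperm2]

-- ===== VERDICT (by name: the statement is the Claim_ definition above) =====
theorem get_dict_diff_spec : Claim_equal_get_dict_diff := by
  intro d _ hpre
  unfold Spec_get_dict_diff
  have hne : d ≠ [] := by
    rcases hpre with ⟨p, hp, _⟩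
    intro h; subst h; exact absurd hp (List.not_mem_nil)
  exact ports_agree d hne
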